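-- pv_equiv track=rewrite | github.com/PygmalionAI/data-toolbox | toolbox/filters/tomato_filter.py | _seems_embarassed
-- ===== SOURCE A (Python) =====
-- def _seems_embarassed(utterance: str) -> bool:
--     '''Most advanced sentiment classification algorithm ever invented.'''
--     last_idx = -1
--
--     # Only look within asterisks (e.g. *text like this*).
--     asterisk_idxs = []
--     while (last_idx := utterance.find("*", last_idx + 1)) != -1:
--         asterisk_idxs.append(last_idx)
--
--     while True:
--         if len(asterisk_idxs) < 2:
--             break
--
--         start_idx = asterisk_idxs.pop(0)
--         end_idx = asterisk_idxs.pop(0)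
--         action = utterance[start_idx:end_idx].lower()
--
--         if any([
--                 x in action for x in
--             ["blush", "like a tomato", "as a tomato", "embarass", "nervous"]
--         ]):
--             return True
--     return False
-- ===== SOURCE B (Python) =====
-- def _seems_embarassed(utterance: str) -> bool:
--     '''Most advanced sentiment classification algorithm ever invented.'''
--     # Splitting on "*" makes the text of each closed asterisk pair the second
--     # element of the remaining part list; consume two parts per pair.
--     parts = utterance.split("*")
--     while len(parts) >= 3:
--         action = parts[1].lower()
--         if any(x in action for x in
--                ["blush", "like a tomato", "as a tomato", "embarass", "nervous"]):
--             return True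
--         del parts[:2]
--     return False
-- ===== Notes on version B (the rewrite author's own statement) =====
-- stated objective: simpler
-- what changed: A collects every asterisk index with a repeated str.find loop and then pops index pairs to slice out each action text; B splits the utterance on the asterisk character once and scans every second remaining part, so the index list, the find loop and the slicing disappear.
import Mathlib
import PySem

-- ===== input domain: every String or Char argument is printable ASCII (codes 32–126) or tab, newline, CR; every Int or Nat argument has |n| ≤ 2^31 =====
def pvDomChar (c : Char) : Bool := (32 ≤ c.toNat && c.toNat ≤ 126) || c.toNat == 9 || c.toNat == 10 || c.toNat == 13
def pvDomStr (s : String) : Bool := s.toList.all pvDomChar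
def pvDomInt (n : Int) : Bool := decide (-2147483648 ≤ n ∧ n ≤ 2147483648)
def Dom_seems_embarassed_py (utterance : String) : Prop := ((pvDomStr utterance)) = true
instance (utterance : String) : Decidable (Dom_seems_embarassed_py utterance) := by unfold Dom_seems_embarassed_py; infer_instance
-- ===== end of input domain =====

-- B replaces A's find-all-asterisk-positions loop and index-pair slicing by a single
-- split('*') whose pair-enclosed texts are consumed two parts at a time (objective: simpler).

-- ===== PORT A =====
-- the keyword list both Pythons scan for
def pvKeywords : List (List Char) :=
  ["blush".toList, "like a tomato".toList, "as a tomato".toList, "embarass".toList, "nervous".toList]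

-- A's first while loop `while (last_idx := utterance.find("*", last_idx + 1)) != -1`,
-- carried as start = last_idx + 1 (a Nat: initially -1 + 1 = 0, afterwards found index + 1);
-- the `start ≤ length` guard only makes the recursion total (findFrom is -1 past the end).
def pvStarLoop (cs : List Char) (start : Nat) : List Int :=
  if hle : start ≤ cs.length then
    let i := PySem.Chars.findFrom cs ['*'] (start : Int) none
    if hi : i = -1 then [] else i :: pvStarLoop cs (i.toNat + 1)
  else []
termination_by cs.length + 1 - start
decreasing_by
  have hs := PySem.Chars.findFrom_natCast_spec cs ['*'] start hle hi
  have h2 : (cs.drop i.toNat).length ≥ 1 := hs.2.1.length_le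
  simp only [List.length_drop] at h2
  omega

-- A's second while loop: pop the first two indices, slice, lower, scan the keyword list
def pvPairLoop (cs : List Char) : List Int → Bool
  | i0 :: i1 :: rest =>
    let action := PySem.Chars.lower (PySem.Chars.slice cs (some i0) (some i1))
    if (pvKeywords.map (fun x => PySem.Chars.isIn x action)).any id then true
    else pvPairLoop cs rest
  | _ => false

def seems_embarassed_py (utterance : String) : Bool :=
  pvPairLoop utterance.toList (pvStarLoop utterance.toList 0)

-- ===== PORT B =====
-- B's while loop: while len(parts) >= 3: check parts[1]; del parts[:2]
def pvAltLoop : List (List Char) → Bool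
  | _a :: b :: c :: rest =>
    let action := PySem.Chars.lower b
    if pvKeywords.any (fun x => PySem.Chars.isIn x action) then true
    else pvAltLoop (c :: rest)
  | _ => false

def seems_embarassed_py_alt (utterance : String) : Bool :=
  pvAltLoop (PySem.Chars.splitOn utterance.toList ['*'])

-- ===== PRECONDITION & SPEC =====
def Spec_seems_embarassed_py (utterance : String) (out : Bool) : Prop := out = seems_embarassed_py_alt utterance
instance (utterance : String) (out : Bool) : Decidable (Spec_seems_embarassed_py utterance out) := by unfold Spec_seems_embarassed_py; infer_instance

-- ===== CLAIM (what is proved, stated in full; the proofs are below) =====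
def Claim_equal_seems_embarassed_py : Prop := ∀ (utterance : String), Dom_seems_embarassed_py utterance → Spec_seems_embarassed_py utterance (seems_embarassed_py utterance)

-- ===== LEMMAS AND PROOFS =====

-- reference splitter: what splitOn · ['*'] computes, in structural form
def pvRefSplit : List Char → List (List Char)
  | [] => [[]]
  | c :: t =>
    if c = '*' then [] :: pvRefSplit t
    else match pvRefSplit t with
      | h :: r => (c :: h) :: r
      | [] => [[c]]

-- positions (as Ints) of '*' in a list, offset by k
def pvPosFrom : List Char → Nat → List Int
  | [], _ => []
  | c :: t, k => if c = '*' then (k : Int) :: pvPosFrom t (k+1) else pvPosFrom t (k+1)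

-- head-merging helper for the splitOn.go invariant
def pvConsHead (p : List Char) : List (List Char) → List (List Char)
  | h :: r => (p ++ h) :: r
  | [] => [p]

theorem pvRefSplit_ne_nil (l : List Char) : pvRefSplit l ≠ [] := by
  match l with
  | [] => simp [pvRefSplit]
  | c :: t =>
    rw [pvRefSplit]; split
    · simp
    · split <;> simp

theorem pvGo_eq (fuel : Nat) : ∀ (l cur : List Char) (acc : List (List Char)),
    l.length < fuel →
    PySem.Chars.splitOn.go ['*'] fuel l cur acc
      = acc.reverse ++ pvConsHead cur.reverse (pvRefSplit l) := by
  induction fuel with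
  | zero => intro l cur acc h; omega
  | succ f ih =>
    intro l cur acc h
    match l with
    | [] =>
      rw [PySem.Chars.splitOn.go]
      · simp [pvRefSplit, pvConsHead]
      · omega
    | c :: rest =>
      rw [PySem.Chars.splitOn.go]
      by_cases hc : c = '*'
      · have hp : List.isPrefixOf ['*'] (c :: rest) = true := by
          simp [List.isPrefixOf, hc]
        rw [if_pos hp]
        rw [ih _ _ _ (by simpa using Nat.lt_of_succ_lt_succ h)]
        rw [pvRefSplit, if_pos hc]
        rcases hr : pvRefSplit rest with _ | ⟨hd, r⟩
        · exact absurd hr (pvRefSplit_ne_nil rest)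
        · simp [pvConsHead, hr]
      · have hp : List.isPrefixOf ['*'] (c :: rest) = false := by
          simp [List.isPrefixOf]; intro h'; exact hc h'.symm
        rw [if_neg (by simp [hp])]
        rw [ih _ _ _ (by simpa using Nat.lt_of_succ_lt_succ h)]
        rw [pvRefSplit, if_neg hc]
        rcases hr : pvRefSplit rest with _ | ⟨hd, r⟩
        · exact absurd hr (pvRefSplit_ne_nil rest)
        · simp [pvConsHead]

theorem pvSplitOn_eq (l : List Char) : PySem.Chars.splitOn l ['*'] = pvRefSplit l := by
  rw [PySem.Chars.splitOn, pvGo_eq (l.length + 1) l [] [] (by omega)]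
  rcases hr : pvRefSplit l with _ | ⟨hd, r⟩
  · exact absurd hr (pvRefSplit_ne_nil l)
  · simp [pvConsHead]

theorem pvPosFrom_no_star {l : List Char} (h : '*' ∉ l) : ∀ k, pvPosFrom l k = [] := by
  induction l with
  | nil => intro k; rfl
  | cons c t ih =>
    intro k
    simp only [List.mem_cons, not_or] at h
    rw [pvPosFrom, if_neg (fun hc => h.1 hc.symm), ih h.2]

theorem pvPosFrom_append {p : List Char} (h : '*' ∉ p) (t : List Char) (k : Nat) :
    pvPosFrom (p ++ '*' :: t) k = ((k + p.length : Nat) : Int) :: pvPosFrom t (k + p.length + 1) := by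
  induction p generalizing k with
  | nil => simp [pvPosFrom]
  | cons c p' ih =>
    simp only [List.mem_cons, not_or] at h
    rw [List.cons_append, pvPosFrom, if_neg (fun hc => h.1 hc.symm), ih h.2]
    have h1 : k + 1 + p'.length = k + (c :: p').length := by simp [List.length_cons]; omega
    rw [h1]

theorem pvRefSplit_no_star {l : List Char} (h : '*' ∉ l) : pvRefSplit l = [l] := by
  induction l with
  | nil => rfl
  | cons c t ih =>
    simp only [List.mem_cons, not_or] at h
    rw [pvRefSplit, if_neg (fun hc => h.1 hc.symm), ih h.2]

theorem pvRefSplit_append {p : List Char} (h : '*' ∉ p) (t : List Char) :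
    pvRefSplit (p ++ '*' :: t) = p :: pvRefSplit t := by
  induction p with
  | nil => simp [pvRefSplit]
  | cons c p' ih =>
    simp only [List.mem_cons, not_or] at h
    rw [List.cons_append, pvRefSplit, if_neg (fun hc => h.1 hc.symm), ih h.2]

theorem pvFirstStar {l : List Char} (h : '*' ∈ l) :
    ∃ p t, l = p ++ '*' :: t ∧ '*' ∉ p := by
  induction l with
  | nil => cases h
  | cons c t ih =>
    by_cases hc : c = '*'
    · exact ⟨[], t, by simp [hc], by simp⟩
    · have h2 : '*' ∈ t := by
        rcases List.mem_cons.1 h with h1 | h2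
        · exact absurd h1.symm hc
        · exact h2
      rcases ih h2 with ⟨p, t', ht, hp⟩
      refine ⟨c :: p, t', by simp [ht], ?_⟩
      simp only [List.mem_cons, not_or]
      exact ⟨fun hc' => hc hc'.symm, hp⟩

theorem pvStarLoop_eq_aux (cs : List Char) :
    ∀ m k, cs.length + 1 - k ≤ m → pvStarLoop cs k = pvPosFrom (cs.drop k) k := by
  intro m
  induction m with
  | zero =>
    intro k hm
    rw [pvStarLoop, dif_neg (by omega), List.drop_of_length_le (by omega), pvPosFrom]
  | succ m ih =>
    intro k hm
    by_cases hle : k ≤ cs.length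
    · rw [pvStarLoop, dif_pos hle]
      simp only []
      by_cases hi : PySem.Chars.findFrom cs ['*'] (k : Int) none = -1
      · rw [dif_pos hi]
        have hns : ¬ (['*'] <:+: cs.drop k) :=
          (PySem.Chars.findFrom_natCast_eq_neg_one_iff cs ['*'] k hle).1 hi
        rw [List.singleton_infix_iff] at hns
        rw [pvPosFrom_no_star hns]
      · rw [dif_neg hi]
        set i := PySem.Chars.findFrom cs ['*'] (k : Int) none with hidef
        have hs := PySem.Chars.findFrom_natCast_spec cs ['*'] k hle hi
        rw [← hidef] at hs
        have hki : (k : Int) ≤ i := hs.1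
        have hkN : k ≤ i.toNat := by omega
        rcases hs.2.1 with ⟨t, ht⟩
        simp only [List.singleton_append] at ht
        have hNlen : i.toNat < cs.length := by
          have : (cs.drop i.toNat).length = t.length + 1 := by rw [← ht]; simp
          simp only [List.length_drop] at this; omega
        have hmin := hs.2.2
        -- decompose cs.drop k as p ++ '*' :: cs.drop (i.toNat + 1)
        set p := (cs.drop k).take (i.toNat - k) with hpdef
        have hplen : p.length = i.toNat - k := by
          simp [hpdef, List.length_take, List.length_drop]; omega
        have htl : t = cs.drop (i.toNat + 1) := by
          have := congrArg List.tail ht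
          simpa [List.tail_drop] using this
        have hdec : cs.drop k = p ++ '*' :: cs.drop (i.toNat + 1) := by
          rw [← htl, ht, hpdef]
          conv_lhs => rw [← List.take_append_drop (i.toNat - k) (cs.drop k)]
          congr 1
          rw [List.drop_drop]
          congr 1
          omega
        have hnostar : '*' ∉ p := by
          intro hmem
          rcases List.mem_iff_getElem.1 hmem with ⟨jj, hjj, hjjeq⟩
          have hjjlt : jj < i.toNat - k := by omega
          have hget : cs[k + jj]'(by omega) = '*' := by
            have : p[jj] = (cs.drop k)[jj]'(by simp [List.length_drop]; omega) := by
              simp [hpdef, List.getElem_take]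
            rw [this] at hjjeq
            simpa [List.getElem_drop] using hjjeq
          apply hmin (k + jj) (by omega) (by omega)
          have hd : cs.drop (k + jj) = '*' :: cs.drop (k + jj + 1) := by
            rw [← List.getElem_cons_drop (show k + jj < cs.length by omega), hget]
          exact ⟨cs.drop (k + jj + 1), by rw [hd]; rfl⟩
        rw [hdec, pvPosFrom_append hnostar, hplen]
        have hi0 : (↑(k + (i.toNat - k)) : Int) = i := by omega
        rw [hi0]
        congr 1
        have : k + (i.toNat - k) + 1 = i.toNat + 1 := by omega
        rw [this]
        exact ih (i.toNat + 1) (by omega)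
    · rw [pvStarLoop, dif_neg hle, List.drop_of_length_le (by omega), pvPosFrom]

theorem pvStarLoop_eq (cs : List Char) (k : Nat) : pvStarLoop cs k = pvPosFrom (cs.drop k) k :=
  pvStarLoop_eq_aux cs (cs.length + 1 - k) k le_rfl

theorem pvIsIn_cons_star {kw : List Char} (hne : kw ≠ []) (hns : '*' ∉ kw) (x : List Char) :
    PySem.Chars.isIn kw ('*' :: x) = PySem.Chars.isIn kw x := by
  have h1 : kw <:+: '*' :: x ↔ kw <:+: x := by
    rw [List.infix_cons_iff]
    constructor
    · rintro (hp | hi)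
      · rcases kw with _ | ⟨c, kw'⟩
        · exact absurd rfl hne
        · rcases List.cons_prefix_cons.1 hp with ⟨hc, _⟩
          exact absurd (by rw [hc]; exact List.mem_cons_self) hns
      · exact hi
    · exact Or.inr
  rcases hx : PySem.Chars.isIn kw x with _ | _
  · have := PySem.Chars.isIn_eq_false_iff kw x |>.1 hx
    rw [PySem.Chars.isIn_eq_false_iff]
    exact fun h => this (h1.1 h)
  · rw [PySem.Chars.isIn_iff_infix]
    exact h1.2 ((PySem.Chars.isIn_iff_infix kw x).1 hx)

-- A's slice carries the opening '*'; no keyword contains '*', so it never matters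
theorem pvCheck_star (x : List Char) :
    ((pvKeywords.map (fun kw => PySem.Chars.isIn kw ('*' :: x))).any id)
      = pvKeywords.any (fun kw => PySem.Chars.isIn kw x) := by
  have h1 := pvIsIn_cons_star (kw := ['b','l','u','s','h']) (by decide) (by decide) x
  have h2 := pvIsIn_cons_star (kw := ['l','i','k','e',' ','a',' ','t','o','m','a','t','o']) (by decide) (by decide) x
  have h3 := pvIsIn_cons_star (kw := ['a','s',' ','a',' ','t','o','m','a','t','o']) (by decide) (by decide) x
  have h4 := pvIsIn_cons_star (kw := ['e','m','b','a','r','a','s','s']) (by decide) (by decide) x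
  have h5 := pvIsIn_cons_star (kw := ['n','e','r','v','o','u','s']) (by decide) (by decide) x
  simp [pvKeywords, h1, h2, h3, h4, h5]

theorem pvSlice_pair (x m y : List Char) :
    PySem.Chars.slice (x ++ '*' :: (m ++ '*' :: y)) (some ((x.length : Nat) : Int))
      (some ((x.length + 1 + m.length : Nat) : Int)) = '*' :: m := by
  simp only [PySem.Chars.slice_eq_listSlice, PySem.List.slice_natCast]
  rw [List.drop_left]
  have h1 : x.length + 1 + m.length - x.length = m.length + 1 := by omega
  rw [h1, List.take_succ_cons, List.take_left]

theorem pvMain : ∀ n (cs : List Char), cs.length ≤ n →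
    ∀ u : List Char, pvPairLoop (u ++ cs) (pvPosFrom cs u.length) = pvAltLoop (pvRefSplit cs) := by
  intro n
  induction n with
  | zero =>
    intro cs hlen u
    have hcs : cs = [] := List.length_eq_zero_iff.1 (by omega)
    subst hcs
    simp [pvPosFrom, pvPairLoop, pvRefSplit, pvAltLoop]
  | succ n ih =>
    intro cs hlen u
    by_cases hstar : '*' ∈ cs
    · rcases pvFirstStar hstar with ⟨p, t, rfl, hp⟩
      by_cases hstar2 : '*' ∈ t
      · rcases pvFirstStar hstar2 with ⟨m, r, rfl, hm⟩
        rw [pvPosFrom_append hp, pvPosFrom_append hm, pvRefSplit_append hp, pvRefSplit_append hm]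
        rcases hr : pvRefSplit r with _ | ⟨h0, r0⟩
        · exact absurd hr (pvRefSplit_ne_nil r)
        simp only [pvPairLoop, pvAltLoop]
        have hsl : PySem.Chars.slice (u ++ (p ++ '*' :: (m ++ '*' :: r)))
            (some ((u.length + p.length : Nat) : Int))
            (some ((u.length + p.length + 1 + m.length : Nat) : Int)) = '*' :: m := by
          have := pvSlice_pair (u ++ p) m r
          simpa [List.append_assoc, List.length_append] using this
        rw [hsl]
        have hlow : PySem.Chars.lower ('*' :: m) = '*' :: PySem.Chars.lower m := rfl
        rw [hlow, pvCheck_star (PySem.Chars.lower m)]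
        by_cases hC : pvKeywords.any (fun x => PySem.Chars.isIn x (PySem.Chars.lower m)) = true
        · rw [if_pos hC, if_pos hC]
        · rw [if_neg hC, if_neg hC, ← hr]
          have hihi := ih r (by simp [List.length_append] at hlen ⊢; omega) (u ++ p ++ '*' :: m ++ ['*'])
          have harg : u.length + p.length + 1 + m.length + 1 = (u ++ p ++ '*' :: m ++ ['*']).length := by
            simp; omega
          have hlst : u ++ (p ++ '*' :: (m ++ '*' :: r)) = (u ++ p ++ '*' :: m ++ ['*']) ++ r := by
            simp
          rw [harg, hlst]
          exact hihi
      · rw [pvPosFrom_append hp, pvPosFrom_no_star hstar2, pvRefSplit_append hp,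
          pvRefSplit_no_star hstar2]
        simp [pvPairLoop, pvAltLoop]
    · rw [pvPosFrom_no_star hstar, pvRefSplit_no_star hstar]
      simp [pvPairLoop, pvAltLoop]

-- ===== VERDICT (by name: the statement is the Claim_ definition above) =====
theorem seems_embarassed_py_spec : Claim_equal_seems_embarassed_py := by
  intro s _
  show seems_embarassed_py s = seems_embarassed_py_alt s
  rw [seems_embarassed_py, seems_embarassed_py_alt, pvStarLoop_eq, List.drop_zero, pvSplitOn_eq]
  have := pvMain s.toList.length s.toList le_rfl []
  simpa using this
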